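-- pv_equiv track=rewrite | github.com/scaverod/Scatter-Search-Tutorial-0-1-Knapsack-Problems | scatter_search_tutorial.py | create_refset
-- ===== SOURCE A (Python) =====
-- def hamming_distance(x, y):
--     return sum(abs(xi - yi) for xi, yi in zip(x, y))
--
-- def min_hamming_dist_to_refset(s, rs_solutions):
--     return min(hamming_distance(s, r) for r in rs_solutions)
--
-- def create_refset(solutions_with_values, b, b1):
--     P_sorted = sorted(solutions_with_values, key=lambda t: t[1], reverse=True)
--
--     # Select b1 best solutions by quality
--     rs_solutions = [P_sorted[i][0][:] for i in range(min(b1, len(P_sorted)))]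
--     rs_values = [P_sorted[i][1] for i in range(min(b1, len(P_sorted)))]
--
--
--
--     candidates = [t for t in P_sorted if tuple(t[0]) not in {tuple(r) for r in rs_solutions}]
--
--     # Select remaining solutions to maximize diversity
--     while len(rs_solutions) < b and candidates:
--         best = max(candidates, key=lambda t: min_hamming_dist_to_refset(t[0], rs_solutions))
--         rs_solutions.append(best[0][:])
--         rs_values.append(best[1])
--         candidates = [t for t in candidates if tuple(t[0]) != tuple(best[0])]
--
--     return rs_solutions, rs_values
-- ===== SOURCE B (Python) =====
-- def dist(x, y):
--     return sum(abs(p - q) for p, q in zip(x, y))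
--
-- def mind(s, rs):
--     d = dist(s, rs[0])
--     for r in rs[1:]:
--         d = min(d, dist(s, r))
--     return d
--
-- def _grow(pool, need):
--     # pool: list of (solution, value, cached min distance to the current refset)
--     if not pool or need <= 0:
--         return [], []
--     best = pool[0]
--     for t in pool[1:]:
--         if t[2] > best[2]:
--             best = t
--     s0, v0 = best[0], best[1]
--     rest = [(s, v, min(d, dist(s, s0))) for s, v, d in pool if s != s0]
--     gs, gv = _grow(rest, need - 1)
--     return [s0] + gs, [v0] + gv
--
-- def create_refset(solutions_with_values, b, b1):
--     P = sorted(solutions_with_values, key=lambda t: t[1], reverse=True)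
--     head = P[:max(b1, 0)]
--     rs = [list(s) for s, _ in head]
--     vals = [v for _, v in head]
--     need = b - len(rs)
--     if need > 0 and rs:
--         pool = [(s, v, mind(s, rs)) for s, v in P if all(s != r for r in rs)]
--         gs, gv = _grow(pool, need)
--         return rs + gs, vals + gv
--     return rs, vals
-- ===== Notes on version B (the rewrite author's own statement) =====
-- stated objective: faster
-- what changed: B caches each candidate's min Hamming distance to the refset and updates it per round with a single distance to the newly added member, and the diversification phase is a recursive argmax-scan that conses its picks onto the recursive result instead of A's while loop that appends to growing refset lists and recomputes every candidate's distance to the whole refset each round.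
import Mathlib
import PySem

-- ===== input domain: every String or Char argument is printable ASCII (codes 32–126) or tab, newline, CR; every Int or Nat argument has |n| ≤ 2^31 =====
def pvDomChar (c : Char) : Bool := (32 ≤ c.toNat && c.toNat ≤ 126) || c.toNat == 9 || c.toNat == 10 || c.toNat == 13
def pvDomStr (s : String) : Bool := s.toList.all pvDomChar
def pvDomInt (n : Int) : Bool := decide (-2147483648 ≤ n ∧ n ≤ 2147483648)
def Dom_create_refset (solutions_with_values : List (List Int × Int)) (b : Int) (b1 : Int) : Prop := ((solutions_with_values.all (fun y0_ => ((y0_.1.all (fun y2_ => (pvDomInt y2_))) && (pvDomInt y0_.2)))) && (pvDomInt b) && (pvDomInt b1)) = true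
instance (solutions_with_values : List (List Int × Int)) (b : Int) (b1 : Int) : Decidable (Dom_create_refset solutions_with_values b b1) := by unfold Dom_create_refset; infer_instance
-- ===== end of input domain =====

-- B caches each candidate's min Hamming distance to the refset, updating it with one distance to
-- the newly added member, and the diversification is a recursive argmax-scan consing its picks
-- (faster than A's per-round recomputation against the whole refset).

-- ===== PORT A =====
-- hamming_distance(x, y) = sum(abs(xi - yi) for xi, yi in zip(x, y))  (Source B's dist is the same sum)
def ham (x y : List Int) : Int := (x.zip y).foldl (fun a p => a + |p.1 - p.2|) 0

-- min_hamming_dist_to_refset: min(...) raises ValueError on rs = []; Pre_ keeps that unreachable,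
-- the .getD 0 default is never used on admitted inputs.
def minDistTo (s : List Int) (rs : List (List Int)) : Int :=
  (PySem.List.min? (rs.map (ham s)) (fun y => y)).getD 0

-- the while loop; fuel = initial number of candidates (each round removes at least the chosen one)
def create_refset_loop (b : Int) : Nat → List (List Int) → List Int → List (List Int × Int) → List (List Int) × List Int
  | 0, rs, vals, _ => (rs, vals)
  | f+1, rs, vals, cands =>
    if (rs.length : Int) < b ∧ cands ≠ [] then
      match PySem.List.max? cands (fun t => minDistTo t.1 rs) with
      | some best => create_refset_loop b f (rs ++ [best.1]) (vals ++ [best.2])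
          (cands.filter (fun t => t.1 != best.1))
      | none => (rs, vals)
    else (rs, vals)

def create_refset (solutions_with_values : List (List Int × Int)) (b : Int) (b1 : Int) : List (List Int) × List Int :=
  let P := PySem.List.sorted solutions_with_values (fun t => t.2) true
  -- range(min(b1, len(P))) indexes the first (min b1 len).toNat elements; [:] copies are identities here
  let k := (min b1 (P.length : Int)).toNat
  let rs := (P.take k).map (fun t => t.1)
  let vals := (P.take k).map (fun t => t.2)
  let cands := P.filter (fun (t : List Int × Int) => decide (t.1 ∉ PySem.Set.ofList rs))
  create_refset_loop b cands.length rs vals cands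

-- ===== PORT B =====
-- mind(s, rs): running minimum seeded with rs[0]; rs = [] would be an IndexError in Python,
-- callers only reach it with rs ≠ [] (the 0 default is never used on admitted inputs)
def mindB (s : List Int) (rs : List (List Int)) : Int :=
  match rs with
  | [] => 0
  | r :: rest => rest.foldl (fun d t => min d (ham s t)) (ham s r)

-- _grow(pool, need): recursive; scan for the first candidate of maximal cached distance, cons it
-- onto the recursion over the updated pool. fuel = pool length (each call drops the pick).
def growB : Nat → List (List Int × Int × Int) → Int → List (List Int) × List Int
  | 0, _, _ => ([], [])
  | _+1, [], _ => ([], [])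
  | f+1, p :: ps, need =>
    if need ≤ 0 then ([], [])
    else
      let best := ps.foldl (fun m t => if m.2.2 < t.2.2 then t else m) p
      let rest := (p :: ps).filterMap (fun t =>
        if t.1 = best.1 then none
        else some (t.1, t.2.1, min t.2.2 (ham t.1 best.1)))
      let g := growB f rest (need - 1)
      (best.1 :: g.1, best.2.1 :: g.2)

def create_refset_alt (solutions_with_values : List (List Int × Int)) (b : Int) (b1 : Int) : List (List Int) × List Int :=
  let P := PySem.List.sorted solutions_with_values (fun t => t.2) true
  let head := PySem.List.slice P none (some (max b1 0))
  let rs := head.map (fun t => t.1)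
  let vals := head.map (fun t => t.2)
  let need := b - (rs.length : Int)
  if 0 < need ∧ rs ≠ [] then
    let pool := (P.filter (fun t => rs.all (fun r => t.1 != r))).map
      (fun t => (t.1, t.2, mindB t.1 rs))
    let g := growB pool.length pool need
    (rs ++ g.1, vals ++ g.2)
  else (rs, vals)

-- ===== PRECONDITION & SPEC =====
-- Pre_ excludes exactly the inputs on which A raises ValueError (min() over an empty refset):
-- a nonempty solution list with b ≥ 1 requested but no best solutions seeded, i.e. b1 ≤ 0.
def Pre_create_refset (solutions_with_values : List (List Int × Int)) (b : Int) (b1 : Int) : Prop :=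
  solutions_with_values = [] ∨ b ≤ 0 ∨ 1 ≤ b1
instance (solutions_with_values : List (List Int × Int)) (b : Int) (b1 : Int) : Decidable (Pre_create_refset solutions_with_values b b1) := by unfold Pre_create_refset; infer_instance

def pvWitness_create_refset : (List (List Int × Int)) × Int × Int :=
  ([([1,0],5),([0,1],3),([0,0],1),([1,1],2)], 3, 1)

def Spec_create_refset (solutions_with_values : List (List Int × Int)) (b : Int) (b1 : Int) (out : List (List Int) × List Int) : Prop := out = create_refset_alt solutions_with_values b b1
instance (solutions_with_values : List (List Int × Int)) (b : Int) (b1 : Int) (out : List (List Int) × List Int) : Decidable (Spec_create_refset solutions_with_values b b1 out) := by unfold Spec_create_refset; infer_instance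

-- ===== CLAIM (what is proved, stated in full; the proofs are below) =====
def Claim_equal_create_refset : Prop := ∀ (solutions_with_values : List (List Int × Int)) (b : Int) (b1 : Int), Dom_create_refset solutions_with_values b b1 → Pre_create_refset solutions_with_values b b1 → Spec_create_refset solutions_with_values b b1 (create_refset solutions_with_values b b1)
-- ===== LEMMAS AND PROOFS =====

-- enrich a candidate with its min distance to rs
def enrich (rs : List (List Int)) (t : List Int × Int) : List Int × Int × Int :=
  (t.1, t.2, minDistTo t.1 rs)

theorem max?_map {α β κ : Type} [LinearOrder κ] (l : List α) (e : α → β) (k : β → κ) :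
    PySem.List.max? (l.map e) k = (PySem.List.max? l (fun x => k (e x))).map e := by
  unfold PySem.List.max?
  suffices h : ∀ (acc : Option α),
      List.foldl
        (fun acc y => match acc with
          | none => some y
          | some m => if k m < k y then some y else some m) (acc.map e) (l.map e)
      = (List.foldl
        (fun acc x => match acc with
          | none => some x
          | some m => if k (e m) < k (e x) then some x else some m) acc l).map e by
    exact h none
  induction l with
  | nil => intro acc; simp
  | cons x xs ih =>
    intro acc
    simp only [List.map_cons, List.foldl_cons]
    rw [← ih]
    congr 1
    cases acc with
    | none => rfl
    | some m => simp only [Option.map_some]; split_ifs <;> rfl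

theorem max?_cons {α κ : Type} [LinearOrder κ] (x : α) (t : List α) (k : α → κ) :
    PySem.List.max? (x :: t) k = some (t.foldl (fun m y => if k m < k y then y else m) x) := by
  unfold PySem.List.max?
  simp only [List.foldl_cons]
  suffices h : ∀ (a : α),
      List.foldl
        (fun acc y => match acc with
          | none => some y
          | some m => if k m < k y then some y else some m) (some a) t
      = some (t.foldl (fun m y => if k m < k y then y else m) a) by
    exact h x
  induction t with
  | nil => intro a; rfl
  | cons y ys ih =>
    intro a
    simp only [List.foldl_cons]
    rw [← ih]
    congr 1
    split_ifs <;> rfl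

theorem mindB_eq (s : List Int) (rs : List (List Int)) (h : rs ≠ []) :
    mindB s rs = minDistTo s rs := by
  obtain ⟨r, rest, rfl⟩ := List.exists_cons_of_ne_nil h
  simp only [mindB, minDistTo, List.map_cons, PySem.List.min?_id_cons, Option.getD_some,
    List.foldl_map]

theorem minDistTo_append (s : List Int) (rs : List (List Int)) (t : List Int) (h : rs ≠ []) :
    minDistTo s (rs ++ [t]) = min (minDistTo s rs) (ham s t) := by
  obtain ⟨r, rt, rfl⟩ := List.exists_cons_of_ne_nil h
  simp only [minDistTo, List.cons_append, List.map_cons, List.map_append, List.map_cons,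
    List.map_nil, PySem.List.min?_id_cons, Option.getD_some, List.foldl_append, List.foldl_cons,
    List.foldl_nil]

theorem filterMap_enrich (l : List (List Int × Int)) (rs : List (List Int)) (s0 : List Int)
    (h : rs ≠ []) :
    l.filterMap (fun t =>
        if (enrich rs t).1 = s0 then none
        else some ((enrich rs t).1, (enrich rs t).2.1, min (enrich rs t).2.2 (ham (enrich rs t).1 s0)))
      = (l.filter (fun t => t.1 != s0)).map (enrich (rs ++ [s0])) := by
  induction l with
  | nil => rfl
  | cons t ts ih =>
    simp only [enrich] at ih ⊢
    rw [List.filterMap_cons, List.filter_cons]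
    by_cases ht : t.1 = s0
    · simpa [ht] using ih
    · simp only [ht, if_false, bne_iff_ne, ne_eq, not_false_eq_true, if_true, List.map_cons]
      rw [← minDistTo_append t.1 rs s0 h, ih]
      rfl

theorem grow_eq (f : Nat) (b : Int) (rs : List (List Int)) (vals : List Int)
    (cands : List (List Int × Int)) (h : rs ≠ []) :
    create_refset_loop b f rs vals cands
      = (rs ++ (growB f (cands.map (enrich rs)) (b - (rs.length : Int))).1,
         vals ++ (growB f (cands.map (enrich rs)) (b - (rs.length : Int))).2) := by
  induction f generalizing rs vals cands with
  | zero => simp [create_refset_loop, growB]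
  | succ f ih =>
    cases cands with
    | nil =>
      rw [create_refset_loop, if_neg (by simp)]
      simp [growB]
    | cons c cs =>
      by_cases hb : (rs.length : Int) < b
      · rw [create_refset_loop, if_pos ⟨hb, by simp⟩, max?_cons]
        set bestA := cs.foldl
          (fun m y => if minDistTo m.1 rs < minDistTo y.1 rs then y else m) c with hA
        show create_refset_loop b f (rs ++ [bestA.1]) (vals ++ [bestA.2])
            ((c :: cs).filter (fun t => t.1 != bestA.1)) = _
        rw [ih (rs ++ [bestA.1]) (vals ++ [bestA.2]) _ (by simp)]
        have hbest : (cs.map (enrich rs)).foldl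
              (fun m t => if m.2.2 < t.2.2 then t else m) (enrich rs c)
            = enrich rs bestA := by
          have h1 := max?_cons (enrich rs c) (cs.map (enrich rs))
            (fun t : List Int × Int × Int => t.2.2)
          have h2 : PySem.List.max? (enrich rs c :: cs.map (enrich rs))
                (fun t : List Int × Int × Int => t.2.2) = some (enrich rs bestA) := by
            rw [← List.map_cons, max?_map, max?_cons]
            rfl
          rw [h2] at h1
          exact (Option.some_injective _ h1).symm
        have harg : (enrich rs c :: cs.map (enrich rs)).filterMap
              (fun t => if t.1 = (enrich rs bestA).1 then none
                else some (t.1, t.2.1, min t.2.2 (ham t.1 (enrich rs bestA).1)))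
            = ((c :: cs).filter (fun t => t.1 != bestA.1)).map (enrich (rs ++ [bestA.1])) := by
          rw [← List.map_cons, List.filterMap_map]
          exact filterMap_enrich (c :: cs) rs bestA.1 h
        simp only [List.map_cons, growB]
        rw [if_neg (by omega : ¬ (b - (rs.length : Int) ≤ 0))]
        rw [hbest, harg]
        have hlen : b - (((rs ++ [bestA.1]).length : Nat) : Int) = b - (rs.length : Int) - 1 := by
          simp; omega
        rw [hlen]
        simp [enrich]
      · rw [create_refset_loop, if_neg (by tauto)]
        simp only [List.map_cons, growB]
        rw [if_pos (by omega : b - (rs.length : Int) ≤ 0)]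
        simp

theorem loopA_stop (f : Nat) (b : Int) (rs : List (List Int)) (vals : List Int)
    (cands : List (List Int × Int)) (h : ¬ ((rs.length : Int) < b ∧ cands ≠ [])) :
    create_refset_loop b f rs vals cands = (rs, vals) := by
  cases f <;> simp [create_refset_loop, h]

theorem take_min_max (P : List (List Int × Int)) (b1 : Int) :
    P.take (min b1 (P.length : Int)).toNat = P.take (max b1 0).toNat := by
  by_cases h : b1 ≤ (P.length : Int)
  · have : (min b1 (P.length : Int)).toNat = (max b1 0).toNat := by omega
    rw [this]
  · have e1 : (min b1 (P.length : Int)).toNat = P.length := by omega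
    rw [e1, List.take_length, List.take_of_length_le (by omega)]

theorem filter_pred_eq (P : List (List Int × Int)) (rs : List (List Int)) :
    P.filter (fun (t : List Int × Int) => decide (t.1 ∉ PySem.Set.ofList rs))
      = P.filter (fun t => rs.all (fun r => t.1 != r)) := by
  apply List.filter_congr
  intro t _
  rw [Bool.eq_iff_iff]
  simp only [decide_eq_true_eq, List.all_eq_true, bne_iff_ne, ne_eq, PySem.Set.mem_ofList]
  constructor
  · intro hm r hr hrt
    exact hm (hrt ▸ hr)
  · intro hall hm
    exact hall t.1 hm rfl

-- ===== VERDICT (by name: the statement is the Claim_ definition above) =====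
theorem create_refset_spec : Claim_equal_create_refset := by
  intro swv b b1 _hdom hpre
  unfold Spec_create_refset
  simp only [create_refset, create_refset_alt]
  rw [PySem.List.slice_to _ (le_max_right b1 0), ← take_min_max]
  set P := PySem.List.sorted swv (fun t => t.2) true with hP
  set k := (min b1 (P.length : Int)).toNat with hk
  set rs := (P.take k).map (fun t => t.1) with hrs
  set vals := (P.take k).map (fun t => t.2) with hvals
  set cands := P.filter (fun (t : List Int × Int) => decide (t.1 ∉ PySem.Set.ofList rs)) with hcands
  by_cases hne : rs = []
  · -- rs empty: under Pre_ the loop can never run (swv = [] or b ≤ 0), both sides return (rs, vals)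
    rw [if_neg (by simp [hne])]
    apply loopA_stop
    rintro ⟨hb, hc⟩
    have hbpos : 0 < b := by
      have : (0 : Int) ≤ rs.length := Int.natCast_nonneg _
      omega
    have hPne : P ≠ [] := fun hPnil => hc (by rw [hcands, hPnil]; rfl)
    rcases hpre with hs | hb0 | hb1
    · exact hPne (by rw [hP, hs]; rfl)
    · omega
    · have hlp : 0 < P.length := List.length_pos_of_ne_nil hPne
      have hk1 : 1 ≤ k := by omega
      rw [hrs] at hne
      rcases List.take_eq_nil_iff.mp (List.map_eq_nil_iff.mp hne) with h0 | h0
      · omega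
      · exact hPne h0
  · by_cases hb : (rs.length : Int) < b
    · rw [if_pos ⟨by omega, hne⟩]
      have hpool : (P.filter (fun t => rs.all (fun r => t.1 != r))).map
            (fun t => (t.1, t.2, mindB t.1 rs)) = cands.map (enrich rs) := by
        rw [hcands, filter_pred_eq]
        apply List.map_congr_left
        intro t _
        simp [enrich, mindB_eq t.1 rs hne]
      rw [hpool, grow_eq cands.length b rs vals cands hne]
      have hlen : (cands.map (enrich rs)).length = cands.length := by simp
      rw [hlen]
    · rw [if_neg (by omega)]
      exact loopA_stop cands.length b rs vals cands (by tauto)
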